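-- pv_equiv track=rewrite | github.com/greenstar1151/Baekjoon | 19583_싸이버개강총회/19583_싸이버개강총회_250219.py | solution
-- ===== SOURCE A (Python) =====
-- from collections import defaultdict
-- from itertools import chain
--
-- def solution(
--     start: int, end: int, stream_end: int, chat_dict: defaultdict[int, list[str]]
-- ):
--     present_before = set(
--         chain.from_iterable(
--             name for _, name in filter(lambda x: start >= x[0], chat_dict.items())
--         )
--     )
--     present_after = set(
--         chain.from_iterable(
--             name
--             for _, name in filter(
--                 lambda x: end <= x[0] <= stream_end, chat_dict.items()
--             )
--         )
--     )
--     return len(present_before & present_after)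
-- ===== SOURCE B (Python) =====
-- def solution(start, end, stream_end, chat_dict):
--     flags = {}
--     for time, names in chat_dict.items():
--         before = start >= time
--         after = end <= time <= stream_end
--         for name in names:
--             pb, pa = flags.get(name, (False, False))
--             flags[name] = (pb or before, pa or after)
--     return sum(1 for pb, pa in flags.values() if pb and pa)
-- ===== Notes on version B (the rewrite author's own statement) =====
-- stated objective: alternative
-- what changed: Replaces the two filtered set comprehensions and the set intersection with a single pass that maintains a per-name (before, after) flag pair in one dict and counts names whose both flags are set.
import Mathlib
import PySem

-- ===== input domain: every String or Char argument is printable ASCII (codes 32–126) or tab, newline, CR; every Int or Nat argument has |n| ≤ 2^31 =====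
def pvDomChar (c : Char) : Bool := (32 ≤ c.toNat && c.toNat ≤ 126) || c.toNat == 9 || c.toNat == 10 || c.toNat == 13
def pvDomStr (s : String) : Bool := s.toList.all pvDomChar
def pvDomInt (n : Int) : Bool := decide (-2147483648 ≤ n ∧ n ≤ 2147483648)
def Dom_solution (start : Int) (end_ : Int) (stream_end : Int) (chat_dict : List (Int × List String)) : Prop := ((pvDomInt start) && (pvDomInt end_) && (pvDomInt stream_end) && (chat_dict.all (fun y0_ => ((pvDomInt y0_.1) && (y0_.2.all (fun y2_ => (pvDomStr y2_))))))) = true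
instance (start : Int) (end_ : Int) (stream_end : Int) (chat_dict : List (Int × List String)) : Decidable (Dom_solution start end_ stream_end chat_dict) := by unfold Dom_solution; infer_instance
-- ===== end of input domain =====

-- B replaces the two filtered set comprehensions + intersection by one pass that
-- keeps a (before, after) flag pair per name in a dict and counts names with both flags.

-- ===== PORT A =====
def solution (start : Int) (end_ : Int) (stream_end : Int) (chat_dict : List (Int × List String)) : Int :=
  let present_before : PySem.Set String :=
    PySem.Set.ofList ((chat_dict.filter (fun x => decide (start ≥ x.1))).flatMap (fun x => x.2))
  let present_after : PySem.Set String :=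
    PySem.Set.ofList ((chat_dict.filter (fun x => decide (end_ ≤ x.1 ∧ x.1 ≤ stream_end))).flatMap (fun x => x.2))
  PySem.Set.len (PySem.Set.inter present_before present_after)

-- ===== PORT B =====
def solution_alt (start : Int) (end_ : Int) (stream_end : Int) (chat_dict : List (Int × List String)) : Int :=
  let flags : PySem.Dict String (Bool × Bool) :=
    chat_dict.foldl (fun d x =>
      let before := decide (start ≥ x.1)
      let after := decide (end_ ≤ x.1 ∧ x.1 ≤ stream_end)
      x.2.foldl (fun d name =>
        let p := d.getD name (false, false)
        d.insert name (p.1 || before, p.2 || after)) d) PySem.Dict.empty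
  ((flags.values.filter (fun p => p.1 && p.2)).length : Int)

-- ===== PRECONDITION & SPEC =====
def Spec_solution (start : Int) (end_ : Int) (stream_end : Int) (chat_dict : List (Int × List String)) (out : Int) : Prop := out = solution_alt start end_ stream_end chat_dict
instance (start : Int) (end_ : Int) (stream_end : Int) (chat_dict : List (Int × List String)) (out : Int) : Decidable (Spec_solution start end_ stream_end chat_dict out) := by unfold Spec_solution; infer_instance

-- ===== CLAIM (what is proved, stated in full; the proofs are below) =====
def Claim_equal_solution : Prop := ∀ (start : Int) (end_ : Int) (stream_end : Int) (chat_dict : List (Int × List String)), Dom_solution start end_ stream_end chat_dict → Spec_solution start end_ stream_end chat_dict (solution start end_ stream_end chat_dict)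

-- ===== LEMMAS AND PROOFS =====

-- inner loop: getD after folding one message's name list
theorem inner_getD (ns : List String) (b a : Bool) (d : PySem.Dict String (Bool × Bool)) (k : String) :
    (ns.foldl (fun d name =>
        let p := d.getD name (false, false)
        d.insert name (p.1 || b, p.2 || a)) d).getD k (false, false)
    = if k ∈ ns then ((d.getD k (false, false)).1 || b, (d.getD k (false, false)).2 || a)
      else d.getD k (false, false) := by
  induction ns generalizing d with
  | nil => simp
  | cons n ns ih =>
    simp only [List.foldl_cons, ih, PySem.Dict.getD_insert, List.mem_cons]
    by_cases hn : k = n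
    · subst hn
      by_cases hk : k ∈ ns
      · simp [hk]
      · simp [hk]
    · by_cases hk : k ∈ ns <;> simp [hn, hk]

-- inner loop: keys
theorem inner_keys (ns : List String) (b a : Bool) (d : PySem.Dict String (Bool × Bool)) :
    (ns.foldl (fun d name =>
        let p := d.getD name (false, false)
        d.insert name (p.1 || b, p.2 || a)) d).keys = PySem.Set.update d.keys ns := by
  exact PySem.Dict.keys_foldl_insert ns
    (fun d name => ((d.getD name (false, false)).1 || b, (d.getD name (false, false)).2 || a)) d

-- outer loop: the first flag is set iff it was set, or the name occurs in a before-window message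
theorem outer_fst (start end_ stream_end : Int) (l : List (Int × List String))
    (d : PySem.Dict String (Bool × Bool)) (k : String) :
    ((l.foldl (fun d x =>
        let before := decide (start ≥ x.1)
        let after := decide (end_ ≤ x.1 ∧ x.1 ≤ stream_end)
        x.2.foldl (fun d name =>
          let p := d.getD name (false, false)
          d.insert name (p.1 || before, p.2 || after)) d) d).getD k (false, false)).1 = true
    ↔ ((d.getD k (false, false)).1 = true
        ∨ k ∈ (l.filter (fun x => decide (start ≥ x.1))).flatMap (fun x => x.2)) := by
  induction l generalizing d with
  | nil => simp
  | cons x xl ih =>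
    simp only [List.foldl_cons, ih, inner_getD, List.filter_cons]
    by_cases hk : k ∈ x.2 <;> by_cases hb : start ≥ x.1 <;>
      simp [hk, hb, List.mem_append]

-- outer loop: the second flag is set iff it was set, or the name occurs in an after-window message
theorem outer_snd (start end_ stream_end : Int) (l : List (Int × List String))
    (d : PySem.Dict String (Bool × Bool)) (k : String) :
    ((l.foldl (fun d x =>
        let before := decide (start ≥ x.1)
        let after := decide (end_ ≤ x.1 ∧ x.1 ≤ stream_end)
        x.2.foldl (fun d name =>
          let p := d.getD name (false, false)
          d.insert name (p.1 || before, p.2 || after)) d) d).getD k (false, false)).2 = true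
    ↔ ((d.getD k (false, false)).2 = true
        ∨ k ∈ (l.filter (fun x => decide (end_ ≤ x.1 ∧ x.1 ≤ stream_end))).flatMap (fun x => x.2)) := by
  induction l generalizing d with
  | nil => simp
  | cons x xl ih =>
    simp only [List.foldl_cons, ih, inner_getD, List.filter_cons]
    by_cases hk : k ∈ x.2 <;> by_cases ha : end_ ≤ x.1 ∧ x.1 ≤ stream_end <;>
      simp [hk, ha, List.mem_append]

-- outer loop: keys
theorem outer_keys (start end_ stream_end : Int) (l : List (Int × List String))
    (d : PySem.Dict String (Bool × Bool)) :
    (l.foldl (fun d x =>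
        let before := decide (start ≥ x.1)
        let after := decide (end_ ≤ x.1 ∧ x.1 ≤ stream_end)
        x.2.foldl (fun d name =>
          let p := d.getD name (false, false)
          d.insert name (p.1 || before, p.2 || after)) d) d).keys
    = PySem.Set.update d.keys (l.flatMap (fun x => x.2)) := by
  induction l generalizing d with
  | nil => simp [PySem.Set.update]
  | cons x xl ih =>
    simp only [List.foldl_cons, ih, inner_keys, List.flatMap_cons]
    simp [PySem.Set.update, List.foldl_append]

theorem flatMap_filter_subset (l : List (Int × List String)) (q : Int × List String → Bool)
    (k : String) (h : k ∈ (l.filter q).flatMap (fun x => x.2)) :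
    k ∈ l.flatMap (fun x => x.2) := by
  simp only [List.mem_flatMap] at h ⊢
  obtain ⟨x, hx, hk⟩ := h
  exact ⟨x, (List.mem_filter.1 hx).1, hk⟩

-- ===== VERDICT (by name: the statement is the Claim_ definition above) =====
theorem solution_spec : Claim_equal_solution := by
  intro start end_ stream_end chat_dict _
  unfold Spec_solution solution solution_alt
  set Bl := (chat_dict.filter (fun x => decide (start ≥ x.1))).flatMap (fun x => x.2) with hBl
  set Al := (chat_dict.filter (fun x => decide (end_ ≤ x.1 ∧ x.1 ≤ stream_end))).flatMap (fun x => x.2) with hAl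
  set All := chat_dict.flatMap (fun x => x.2) with hAll
  set flags := chat_dict.foldl (fun d x =>
      let before := decide (start ≥ x.1)
      let after := decide (end_ ≤ x.1 ∧ x.1 ≤ stream_end)
      x.2.foldl (fun d name =>
        let p := d.getD name (false, false)
        d.insert name (p.1 || before, p.2 || after)) d) PySem.Dict.empty with hflags
  have h1 := outer_fst start end_ stream_end chat_dict PySem.Dict.empty
  have h2 := outer_snd start end_ stream_end chat_dict PySem.Dict.empty
  rw [← hBl] at h1
  rw [← hAl] at h2
  rw [← hflags] at h1 h2
  simp only [PySem.Dict.getD_empty, Bool.false_eq_true, false_or] at h1 h2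
  have hkeys : flags.keys = PySem.Set.ofList All := by
    rw [hflags, outer_keys]
    simp only [PySem.Dict.keys_empty, PySem.Set.update_nil_left, ← hAll]
  have hnd : flags.keys.Nodup := by rw [hkeys]; exact PySem.Set.nodup_ofList All
  have hget : ∀ k, flags.getD k (false, false) = (decide (k ∈ Bl), decide (k ∈ Al)) := by
    intro k
    refine Prod.ext ?_ ?_
    · by_cases hP : k ∈ Bl
      · simpa [hP] using (h1 k).mpr hP
      · simp only [hP, decide_false]
        exact Bool.eq_false_iff.mpr (fun hb => hP ((h1 k).mp hb))
    · by_cases hP : k ∈ Al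
      · simpa [hP] using (h2 k).mpr hP
      · simp only [hP, decide_false]
        exact Bool.eq_false_iff.mpr (fun hb => hP ((h2 k).mp hb))
  have hvals : flags.values = flags.keys.map (fun k => flags.getD k (false, false)) :=
    PySem.Dict.values_eq_map_keys flags hnd (false, false)
  have hlen : (flags.values.filter (fun p => p.1 && p.2)).length
      = ((PySem.Set.ofList All).filter (fun k => decide (k ∈ Bl) && decide (k ∈ Al))).length := by
    rw [hvals, List.filter_map, List.length_map, hkeys]
    congr 1
    apply List.filter_congr
    intro k _
    simp only [Function.comp_apply, hget]
  have hsub : ∀ k, k ∈ Bl → k ∈ All := by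
    intro k hk
    rw [hAll]
    exact flatMap_filter_subset _ _ _ (hBl ▸ hk)
  have hperm : (PySem.Set.inter (PySem.Set.ofList Bl) (PySem.Set.ofList Al)).Perm
      ((PySem.Set.ofList All).filter (fun k => decide (k ∈ Bl) && decide (k ∈ Al))) := by
    apply (List.perm_ext_iff_of_nodup ?_ ?_).2
    · intro k
      simp only [PySem.Set.mem_inter, PySem.Set.mem_ofList, List.mem_filter,
        Bool.and_eq_true, decide_eq_true_eq]
      constructor
      · rintro ⟨hb, ha⟩
        exact ⟨hsub k hb, hb, ha⟩
      · rintro ⟨_, hb, ha⟩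
        exact ⟨hb, ha⟩
    · exact PySem.Set.nodup_inter _ _ (PySem.Set.nodup_ofList Bl)
    · exact ((PySem.Set.nodup_ofList All).filter _)
  simp only [PySem.Set.len]
  rw [hlen, ← hperm.length_eq]
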